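-- pv_equiv track=rewrite | github.com/gatorbacon/wrestledata-simple | scripts/process_raw_matches_by_season.py | strip_result
-- ===== SOURCE A (Python) =====
-- def strip_result(text):
--     text = text.strip()
--     if not text.endswith(")"):
--         return text, ""
--     index = len(text) - 1
--     depth = 1
--     while index > 0:
--         index -= 1
--         if text[index] == ")":
--             depth += 1
--         elif text[index] == "(":
--             depth -= 1
--             if depth == 0:
--                 result = text[index + 1:-1].strip()
--                 rest = text[:index].strip()
--                 return rest, result
--     return text, ""
-- ===== SOURCE B (Python) =====
-- def strip_result(text):
--     text = text.strip()
--     if not text.endswith(")"):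
--         return text, ""
--     # forward single pass over everything before the last character, keeping a
--     # stack of unmatched opener indices; the trailing closer matches the stack top.
--     stack = []
--     for i, ch in enumerate(text[:-1]):
--         if ch == "(":
--             stack.append(i)
--         elif ch == ")":
--             if stack:
--                 stack.pop()
--     if not stack:
--         return text, ""
--     j = stack[-1]
--     return text[:j].strip(), text[j+1:-1].strip()
-- ===== Notes on version B (the rewrite author's own statement) =====
-- stated objective: alternative
-- what changed: Replaces A's backward depth-counter scan from the end with a forward single pass that keeps a stack of unmatched opening-bracket indices over everything before the last character and matches the final closing bracket against the stack top.
import Mathlib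
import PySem

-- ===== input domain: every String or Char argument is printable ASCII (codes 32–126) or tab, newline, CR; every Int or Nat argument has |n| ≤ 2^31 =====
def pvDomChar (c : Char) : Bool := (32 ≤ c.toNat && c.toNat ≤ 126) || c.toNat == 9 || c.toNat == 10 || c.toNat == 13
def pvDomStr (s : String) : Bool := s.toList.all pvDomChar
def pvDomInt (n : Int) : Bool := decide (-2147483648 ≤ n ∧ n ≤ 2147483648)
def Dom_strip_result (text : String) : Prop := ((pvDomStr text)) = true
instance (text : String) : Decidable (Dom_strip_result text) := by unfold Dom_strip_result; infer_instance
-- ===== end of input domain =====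

-- B replaces A's backward depth-counter scan with a forward single pass keeping a
-- stack of unmatched opening-bracket indices over all but the last character; same cost, alternative algorithm.


-- ===== PORT A =====
-- the while loop: `index` counts down; `t[i]?.getD ' '` is text[index] (always in range here, so exact)
def stripResultGoA (t : List Char) (index : Nat) (depth : Int) : String × String :=
  match index with
  | 0 => (String.ofList t, "")
  | i + 1 =>
      if t[i]?.getD ' ' = ')' then stripResultGoA t i (depth + 1)
      else if t[i]?.getD ' ' = '(' then
        (if depth - 1 = 0 then
          (String.ofList (PySem.Chars.strip (PySem.List.slice t none (some (i : Int)))),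
           String.ofList (PySem.Chars.strip (PySem.List.slice t (some ((i : Int) + 1)) (some (-1)))))
         else stripResultGoA t i (depth - 1))
      else stripResultGoA t i depth

def strip_result (text : String) : String × String :=
  let t := PySem.Chars.strip text.toList
  if PySem.Chars.endswith t [')'] then stripResultGoA t (t.length - 1) 1
  else (String.ofList t, "")

-- ===== PORT B =====
-- one forward pass over enumerate(text[:-1]): push opener indices, pop on a closer
def stripResultStackB (body : List Char) : List Int :=
  (PySem.List.enumerate body 0).foldl
    (fun s p =>
      if p.2 = '(' then s ++ [p.1]
      else if p.2 = ')' then (if s.isEmpty then s else s.dropLast)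
      else s) []

def strip_result_alt (text : String) : String × String :=
  let t := PySem.Chars.strip text.toList
  if PySem.Chars.endswith t [')'] then
    let stack := stripResultStackB (PySem.List.slice t none (some (-1)))
    match stack.getLast? with
    | none => (String.ofList t, "")
    | some j =>
        (String.ofList (PySem.Chars.strip (PySem.List.slice t none (some j))),
         String.ofList (PySem.Chars.strip (PySem.List.slice t (some (j + 1)) (some (-1)))))
  else (String.ofList t, "")

-- ===== PRECONDITION & SPEC =====
def Spec_strip_result (text : String) (out : String × String) : Prop := out = strip_result_alt text
instance (text : String) (out : String × String) : Decidable (Spec_strip_result text out) := by unfold Spec_strip_result; infer_instance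

-- ===== CLAIM (what is proved, stated in full; the proofs are below) =====
def Claim_equal_strip_result : Prop := ∀ (text : String), Dom_strip_result text → Spec_strip_result text (strip_result text)

-- ===== LEMMAS AND PROOFS =====

-- proof-side stack (top at the head), built left to right over the first m characters of t
def pvStk (t : List Char) : Nat → List Int
  | 0 => []
  | m + 1 =>
      let s := pvStk t m
      if t[m]?.getD ' ' = '(' then (m : Int) :: s
      else if t[m]?.getD ' ' = ')' then s.tail else s

-- what both programs return once the matching opener (or its absence) is known
def pvOut (t : List Char) (j? : Option Int) : String × String :=
  match j? with
  | none => (String.ofList t, "")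
  | some j =>
      (String.ofList (PySem.Chars.strip (PySem.List.slice t none (some j))),
       String.ofList (PySem.Chars.strip (PySem.List.slice t (some (j + 1)) (some (-1)))))

theorem pvGoA_eq_stk (t : List Char) (m : Nat) : ∀ d : Nat,
    stripResultGoA t m ((d : Int) + 1) = pvOut t ((pvStk t m)[d]?) := by
  induction m with
  | zero => intro d; simp [stripResultGoA, pvStk, pvOut]
  | succ i ih =>
      intro d
      simp only [stripResultGoA, pvStk]
      by_cases hc : t[i]?.getD ' ' = ')'
      · have hcast : ((d : Int) + 1) + 1 = ((d + 1 : Nat) : Int) + 1 := by push_cast; ring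
        rw [if_pos hc, if_neg (by simp [hc]), if_pos hc, hcast, ih (d + 1)]
        cases h : pvStk t i with
        | nil => simp
        | cons a s => simp
      · by_cases ho : t[i]?.getD ' ' = '('
        · rw [if_neg hc, if_pos ho, if_pos ho]
          cases d with
          | zero => norm_num [pvOut]
          | succ k =>
              have h2 : ((k + 1 : Nat) : Int) + 1 - 1 = (k : Int) + 1 := by push_cast; ring
              rw [h2, if_neg (by omega), ih k]
              simp
        · rw [if_neg hc, if_neg ho, if_neg ho, if_neg hc, ih d]

theorem pvEnumerate_snoc (xs : List Char) (x : Char) (s : Int) :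
    PySem.List.enumerate (xs ++ [x]) s = PySem.List.enumerate xs s ++ [(s + xs.length, x)] := by
  induction xs generalizing s with
  | nil => simp [PySem.List.enumerate_nil, PySem.List.enumerate_cons]
  | cons a l ih => simp [PySem.List.enumerate_cons, ih]; omega

theorem pvStackB_eq_stk (t : List Char) (body : List Char) (hb : body = t.dropLast) :
    ∀ m, m ≤ body.length →
      stripResultStackB (body.take m) = (pvStk t m).reverse := by
  intro m
  induction m with
  | zero => intro _; simp [stripResultStackB, pvStk, PySem.List.enumerate_nil]
  | succ k ih =>
      intro hm
      have hk : k < body.length := by omega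
      have htake : body.take (k + 1) = body.take k ++ [body[k]] := by
        rw [List.take_add_one, List.getElem?_eq_getElem hk]; rfl
      have hchar : t[k]?.getD ' ' = body[k] := by
        subst hb
        have hkt : k < t.length := by rw [List.length_dropLast] at hk; omega
        rw [List.getElem?_eq_getElem hkt, Option.getD_some, List.getElem_dropLast]
      have hlen : (body.take k).length = k := by
        rw [List.length_take]; omega
      rw [htake]
      simp only [stripResultStackB, pvEnumerate_snoc, List.foldl_append, List.foldl_cons,
        List.foldl_nil, hlen]
      rw [show stripResultStackB (body.take k) = ((PySem.List.enumerate (body.take k) 0).foldl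
        (fun s p => if p.2 = '(' then s ++ [p.1]
          else if p.2 = ')' then (if s.isEmpty then s else s.dropLast) else s) []) from rfl] at ih
      rw [ih (by omega)]
      simp only [pvStk, ← hchar]
      by_cases ho : t[k]?.getD ' ' = '('
      · simp [ho]
      · by_cases hc : t[k]?.getD ' ' = ')'
        · rw [if_neg ho, if_pos hc, if_neg ho, if_pos hc]
          cases h : pvStk t k with
          | nil => simp
          | cons a s => simp
        · rw [if_neg ho, if_neg hc, if_neg ho, if_neg hc]

-- ===== VERDICT (by name: the statement is the Claim_ definition above) =====
theorem strip_result_spec : Claim_equal_strip_result := by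
  unfold Claim_equal_strip_result
  intro text _
  unfold Spec_strip_result strip_result strip_result_alt
  set t := PySem.Chars.strip text.toList with ht
  by_cases he : PySem.Chars.endswith t [')']
  · simp only [he, if_true]
    have hbody : PySem.List.slice t none (some (-1)) = t.dropLast := by simp [pysem]
    have hlen : t.length - 1 = t.dropLast.length := by
      rw [List.length_dropLast]
    have hstack : stripResultStackB (PySem.List.slice t none (some (-1)))
        = (pvStk t (t.length - 1)).reverse := by
      have h1 := pvStackB_eq_stk t t.dropLast rfl t.dropLast.length (le_refl _)
      rw [List.take_length] at h1
      rw [hbody, hlen, h1]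
    have hA : stripResultGoA t (t.length - 1) 1 = pvOut t ((pvStk t (t.length - 1))[0]?) := by
      have := pvGoA_eq_stk t (t.length - 1) 0
      simpa using this
    rw [hA, hstack, List.getLast?_reverse]
    rw [List.head?_eq_getElem?]
    cases (pvStk t (t.length - 1))[0]? with
    | none => simp [pvOut]
    | some j => simp [pvOut]
  · simp [he]
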